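-- pv_equiv track=rewrite | github.com/Ssxpn/BD-1-Conversationnal-AI | text_to_speech_v0.py | map_letters_to_sound_groups
-- ===== SOURCE A (Python) =====
-- BSP_GROUPS = {
--     "B": {"b", "p", "d", "t", "k", "g", "q"},
--     "S": {"s", "z", "f", "v", "j", "x", "h"},
--     "P": {"l", "m", "n", "r"}
-- }
--
-- def map_letters_to_sound_groups(text):
--     result = []
--     for c in text:
--         c_lower = c.lower()
--         for group, letters in BSP_GROUPS.items():
--             if c_lower in letters:
--                 result.append(group)
--                 break
--         else:
--             result.append(c_lower)
--     return result
-- ===== SOURCE B (Python) =====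
-- BSP_GROUPS = {
--     "B": {"b", "p", "d", "t", "k", "g", "q"},
--     "S": {"s", "z", "f", "v", "j", "x", "h"},
--     "P": {"l", "m", "n", "r"}
-- }
--
-- # translation table built once for str.translate: letter -> its group name
-- _TRANS = str.maketrans({letter: group for group, letters in BSP_GROUPS.items() for letter in letters})
--
-- def map_letters_to_sound_groups(text):
--     # staged whole-string passes: lower once, translate once, split into chars
--     return list(text.lower().translate(_TRANS))
-- ===== Notes on version B (the rewrite author's own statement) =====
-- stated objective: idiomatic
-- what changed: Replaces A's per-character loop with nested scans over three sets (and for/else fallback) by staged whole-string passes: lower the whole text once, apply one str.translate with a precomputed str.maketrans table, and list() the result; there is no per-character loop or conditional in B.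
import Mathlib
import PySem

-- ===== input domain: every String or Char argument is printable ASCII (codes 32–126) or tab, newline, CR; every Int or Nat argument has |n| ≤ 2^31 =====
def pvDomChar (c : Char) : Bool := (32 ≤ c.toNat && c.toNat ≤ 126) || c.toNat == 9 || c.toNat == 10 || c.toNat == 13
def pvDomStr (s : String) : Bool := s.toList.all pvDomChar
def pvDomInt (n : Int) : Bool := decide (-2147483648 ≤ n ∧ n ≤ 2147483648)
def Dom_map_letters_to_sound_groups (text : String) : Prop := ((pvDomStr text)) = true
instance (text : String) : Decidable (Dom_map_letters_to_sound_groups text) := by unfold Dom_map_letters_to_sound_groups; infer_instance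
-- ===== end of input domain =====

-- B replaces A's per-character loop (nested scan over three sets with for/else)
-- by staged whole-string passes: lower once, translate once via a precomputed table, split.

-- ===== PORT A =====
-- BSP_GROUPS: dict of group name -> set of letters, in insertion order
def bspGroups : List (String × PySem.Set Char) :=
  [("B", PySem.Set.ofList ['b', 'p', 'd', 't', 'k', 'g', 'q']),
   ("S", PySem.Set.ofList ['s', 'z', 'f', 'v', 'j', 'x', 'h']),
   ("P", PySem.Set.ofList ['l', 'm', 'n', 'r'])]

-- the inner `for group, letters in BSP_GROUPS.items(): if … break / else:` loop
def aInner (result : List String) (cl : Char) : List (String × PySem.Set Char) → List String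
  | [] => result ++ [String.ofList [cl]]                 -- for/else: no break happened
  | (group, letters) :: rest =>
      if PySem.Set.contains letters cl then result ++ [group]
      else aInner result cl rest

def map_letters_to_sound_groups (text : String) : List String :=
  text.toList.foldl (fun result c =>
    let cl := PySem.Chars.lowerChar c
    aInner result cl bspGroups) []

-- ===== PORT B =====
-- _TRANS = str.maketrans({letter: group ...}) built once: char-to-char table
def transTable : PySem.Dict Char Char :=
  PySem.Dict.ofList
    [('b', 'B'), ('p', 'B'), ('d', 'B'), ('t', 'B'), ('k', 'B'), ('g', 'B'), ('q', 'B'),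
     ('s', 'S'), ('z', 'S'), ('f', 'S'), ('v', 'S'), ('j', 'S'), ('x', 'S'), ('h', 'S'),
     ('l', 'P'), ('m', 'P'), ('n', 'P'), ('r', 'P')]

-- str.translate: chars absent from the table pass through unchanged
def translateChar (c : Char) : Char := (PySem.Dict.get? transTable c).getD c

def map_letters_to_sound_groups_alt (text : String) : List String :=
  let lowered := PySem.Str.lower text              -- text.lower()
  let translated := lowered.toList.map translateChar  -- .translate(_TRANS)
  translated.map (fun c => String.ofList [c])      -- list(...)

-- ===== PRECONDITION & SPEC =====
def Spec_map_letters_to_sound_groups (text : String) (out : List String) : Prop := out = map_letters_to_sound_groups_alt text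
instance (text : String) (out : List String) : Decidable (Spec_map_letters_to_sound_groups text out) := by unfold Spec_map_letters_to_sound_groups; infer_instance

-- ===== CLAIM (what is proved, stated in full; the proofs are below) =====
def Claim_equal_map_letters_to_sound_groups : Prop := ∀ (text : String), Dom_map_letters_to_sound_groups text → Spec_map_letters_to_sound_groups text (map_letters_to_sound_groups text)

-- ===== LEMMAS AND PROOFS =====

-- value returned by A's inner loop for one (lowered) character
def innerVal (cl : Char) : List (String × PySem.Set Char) → String
  | [] => String.ofList [cl]
  | (group, letters) :: rest =>
      if PySem.Set.contains letters cl then group else innerVal cl rest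

theorem aInner_append (result : List String) (cl : Char)
    (gs : List (String × PySem.Set Char)) :
    aInner result cl gs = result ++ [innerVal cl gs] := by
  induction gs with
  | nil => rfl
  | cons g rest ih =>
    obtain ⟨group, letters⟩ := g
    simp only [aInner, innerVal]
    split_ifs <;> simp [ih]

theorem transTable_eq : transTable = PySem.Dict.mk
    [('b', 'B'), ('p', 'B'), ('d', 'B'), ('t', 'B'), ('k', 'B'), ('g', 'B'), ('q', 'B'),
     ('s', 'S'), ('z', 'S'), ('f', 'S'), ('v', 'S'), ('j', 'S'), ('x', 'S'), ('h', 'S'),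
     ('l', 'P'), ('m', 'P'), ('n', 'P'), ('r', 'P')] := by
  set_option maxHeartbeats 1000000 in decide

-- per-character agreement: A's inner group scan equals B's translated character
theorem val_eq (cl : Char) :
    innerVal cl bspGroups = String.ofList [translateChar cl] := by
  by_cases h : cl ∈ (['b','p','d','t','k','g','q','s','z','f','v','j','x','h','l','m','n','r'] : List Char)
  · fin_cases h <;> decide
  · simp only [List.mem_cons, List.not_mem_nil, or_false, not_or] at h
    obtain ⟨h1,h2,h3,h4,h5,h6,h7,h8,h9,h10,h11,h12,h13,h14,h15,h16,h17,h18⟩ := h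
    have g1 : ('b' == cl) = false := by simp; exact fun e => h1 e.symm
    have g2 : ('p' == cl) = false := by simp; exact fun e => h2 e.symm
    have g3 : ('d' == cl) = false := by simp; exact fun e => h3 e.symm
    have g4 : ('t' == cl) = false := by simp; exact fun e => h4 e.symm
    have g5 : ('k' == cl) = false := by simp; exact fun e => h5 e.symm
    have g6 : ('g' == cl) = false := by simp; exact fun e => h6 e.symm
    have g7 : ('q' == cl) = false := by simp; exact fun e => h7 e.symm
    have g8 : ('s' == cl) = false := by simp; exact fun e => h8 e.symm
    have g9 : ('z' == cl) = false := by simp; exact fun e => h9 e.symm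
    have g10 : ('f' == cl) = false := by simp; exact fun e => h10 e.symm
    have g11 : ('v' == cl) = false := by simp; exact fun e => h11 e.symm
    have g12 : ('j' == cl) = false := by simp; exact fun e => h12 e.symm
    have g13 : ('x' == cl) = false := by simp; exact fun e => h13 e.symm
    have g14 : ('h' == cl) = false := by simp; exact fun e => h14 e.symm
    have g15 : ('l' == cl) = false := by simp; exact fun e => h15 e.symm
    have g16 : ('m' == cl) = false := by simp; exact fun e => h16 e.symm
    have g17 : ('n' == cl) = false := by simp; exact fun e => h17 e.symm
    have g18 : ('r' == cl) = false := by simp; exact fun e => h18 e.symm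
    simp [innerVal, bspGroups, PySem.Set.ofList, PySem.Set.contains, translateChar,
      transTable_eq, PySem.Dict.get?, List.find?, *]

theorem step_eq (result : List String) (cl : Char) :
    aInner result cl bspGroups = result ++ [String.ofList [translateChar cl]] := by
  rw [aInner_append, val_eq]

theorem fold_eq (cs : List Char) (result : List String) :
    cs.foldl (fun result c => aInner result (PySem.Chars.lowerChar c) bspGroups) result
      = result ++ cs.map (fun c => String.ofList [translateChar (PySem.Chars.lowerChar c)]) := by
  have hf : (fun result c => aInner result (PySem.Chars.lowerChar c) bspGroups)
      = fun (result : List String) c =>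
          result ++ [String.ofList [translateChar (PySem.Chars.lowerChar c)]] := by
    funext r c; exact step_eq r (PySem.Chars.lowerChar c)
  rw [hf, PySem.List.foldl_append_singleton_eq_map]

-- ===== VERDICT (by name: the statement is the Claim_ definition above) =====
theorem map_letters_to_sound_groups_spec : Claim_equal_map_letters_to_sound_groups := by
  intro text _
  unfold Spec_map_letters_to_sound_groups map_letters_to_sound_groups map_letters_to_sound_groups_alt
  simp only [fold_eq, List.nil_append, PySem.Str.toList_lower, PySem.Chars.lower, List.map_map]
  rfl
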